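-- pv_equiv track=rewrite | github.com/shmoregendiggle/Wellesley-AP-CSA-editor | pullProjects.py | getTerm
-- ===== SOURCE A (Python) =====
-- def getTerm(day, month):
--     terms = [(-1, 10), (1, 22), (4, 2), (6, 30)]
--     if month > 7:
--         month -= 12
--     term = 1
--     for i in range(len(terms)):
--         if month > terms[i][0] or month == terms[i][0] and day > terms[i][1]:
--             term = i + 2
--     return term
-- ===== SOURCE B (Python) =====
-- def getTerm(day, month):
--     if month > 7:
--         month -= 12
--     terms = [(-1, 10), (1, 22), (4, 2), (6, 30)]
--     lo, hi = 0, len(terms)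
--     while lo < hi:
--         mid = (lo + hi) // 2
--         if terms[mid] < (month, day):
--             lo = mid + 1
--         else:
--             hi = mid
--     return 1 + lo
-- ===== Notes on version B (the rewrite author's own statement) =====
-- stated objective: alternative
-- what changed: Replaces the linear scan that records the last passed threshold with a hand-written binary search (bisect_left) over the sorted threshold table, returning 1 plus the count of thresholds strictly below (month, day).
import Mathlib
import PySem

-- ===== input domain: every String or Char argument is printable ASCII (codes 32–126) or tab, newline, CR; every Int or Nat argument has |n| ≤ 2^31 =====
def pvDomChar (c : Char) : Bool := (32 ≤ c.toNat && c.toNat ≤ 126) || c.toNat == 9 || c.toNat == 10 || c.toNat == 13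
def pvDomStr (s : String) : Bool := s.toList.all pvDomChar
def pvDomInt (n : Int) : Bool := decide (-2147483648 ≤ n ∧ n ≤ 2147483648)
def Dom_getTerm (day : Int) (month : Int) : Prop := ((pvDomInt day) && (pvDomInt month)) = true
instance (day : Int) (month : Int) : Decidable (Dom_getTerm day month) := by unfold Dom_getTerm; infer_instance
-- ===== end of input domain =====

-- B replaces A's linear scan of the threshold table with a binary search (hand-written bisect_left); alternative decomposition, same result.

-- ===== PORT A =====
-- A: scan all thresholds, remembering i+2 for the last one that (month, day) has passed.
def getTerm (day : Int) (month : Int) : Int :=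
  let terms : List (Int × Int) := [(-1, 10), (1, 22), (4, 2), (6, 30)]
  let month := if month > 7 then month - 12 else month
  (PySem.List.pyRange 0 (terms.length : Int) 1).foldl (fun term i =>
    -- terms[i]: i is always in range here, so pyGetD's default (0, 0) is never used
    let t := PySem.List.pyGetD terms i (0, 0)
    if month > t.1 ∨ (month = t.1 ∧ day > t.2) then i + 2 else term) 1

-- ===== PORT B =====
-- 'while lo < hi' binary search; fuel = hi - lo bounds the iterations (returns lo when exhausted, never reached)
def bisectLeftB (terms : List (Int × Int)) (key : Int × Int) (lo hi : Nat) : Nat → Nat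
  | 0 => lo
  | fuel + 1 =>
    if lo < hi then
      let mid := (lo + hi) / 2
      match terms[mid]? with
      | some t =>
        -- Python tuple comparison terms[mid] < (month, day), lexicographic
        if t.1 < key.1 ∨ (t.1 = key.1 ∧ t.2 < key.2) then
          bisectLeftB terms key (mid + 1) hi fuel
        else
          bisectLeftB terms key lo mid fuel
      | none => lo
    else lo

def getTerm_alt (day : Int) (month : Int) : Int :=
  let month := if month > 7 then month - 12 else month
  let terms : List (Int × Int) := [(-1, 10), (1, 22), (4, 2), (6, 30)]
  1 + (bisectLeftB terms (month, day) 0 terms.length terms.length : Int)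

-- ===== PRECONDITION & SPEC =====
def Spec_getTerm (day : Int) (month : Int) (out : Int) : Prop := out = getTerm_alt day month
instance (day : Int) (month : Int) (out : Int) : Decidable (Spec_getTerm day month out) := by unfold Spec_getTerm; infer_instance

-- ===== CLAIM (what is proved, stated in full; the proofs are below) =====
def Claim_equal_getTerm : Prop := ∀ (day : Int) (month : Int), Dom_getTerm day month → Spec_getTerm day month (getTerm day month)

-- ===== LEMMAS AND PROOFS =====

-- closed-form evaluation of the binary search on the 4-entry threshold table
theorem bis4 (m d : Int) :
  bisectLeftB [(-1,10),(1,22),(4,2),(6,30)] (m,d) 0 4 4 =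
  (if (4:Int) < m ∨ (4 = m ∧ 2 < d) then
    (if (6:Int) < m ∨ (6 = m ∧ 30 < d) then 4 else 3)
  else if (1:Int) < m ∨ (1 = m ∧ 22 < d) then 2
  else if (-1:Int) < m ∨ (-1 = m ∧ 10 < d) then 1 else 0) := by
  simp only [bisectLeftB]
  norm_num

-- ===== VERDICT (by name: the statement is the Claim_ definition above) =====
theorem getTerm_spec : Claim_equal_getTerm := by
  intro day month _
  unfold Spec_getTerm getTerm getTerm_alt
  have hr : PySem.List.pyRange 0 (((4:Nat) : Int)) 1 = [0, 1, 2, 3] := by decide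
  have h0 : PySem.List.pyGetD [((-1:Int),(10:Int)),(1,22),(4,2),(6,30)] 0 (0,0) = (-1,10) := by decide
  have h1 : PySem.List.pyGetD [((-1:Int),(10:Int)),(1,22),(4,2),(6,30)] 1 (0,0) = (1,22) := by decide
  have h2 : PySem.List.pyGetD [((-1:Int),(10:Int)),(1,22),(4,2),(6,30)] 2 (0,0) = (4,2) := by decide
  have h3 : PySem.List.pyGetD [((-1:Int),(10:Int)),(1,22),(4,2),(6,30)] 3 (0,0) = (6,30) := by decide
  have hl : ([((-1:Int),(10:Int)),(1,22),(4,2),(6,30)] : List (Int × Int)).length = 4 := rfl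
  simp only [hl, hr, List.foldl, h0, h1, h2, h3, bis4]
  split_ifs <;> omega
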